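-- pv_equiv track=rewrite | github.com/bipentihexium/wys_arg_tools | python/wys_lib.py | rev5
-- ===== SOURCE A (Python) =====
-- def rev5(data:str, req:str) -> list:
-- 	out = []
-- 	at = 0
-- 	for x in req:
-- 		i = data.index(x)
-- 		out.append((i-at)%len(data))
-- 		at = i
-- 		data = data[:at] + data[at+1:]
-- 	return out
-- ===== SOURCE B (Python) =====
-- # B: instead of rescanning and rebuilding the shrinking string, index positions of each
-- # character once into per-char queues and track deletions in a flag array; the current
-- # index of an original position j is j minus the number of deleted positions below j.
-- def rev5(data: str, req: str) -> list:
-- 	n = len(data)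
-- 	queues = {}
-- 	for j, c in enumerate(data):
-- 		queues.setdefault(c, []).append(j)
-- 	deleted = [False] * n
-- 	out = []
-- 	at = 0
-- 	k = 0
-- 	for x in req:
-- 		q = queues[x]
-- 		j = q[0]
-- 		queues[x] = q[1:]
-- 		i = j - sum(deleted[:j])
-- 		out.append((i - at) % (n - k))
-- 		at = i
-- 		deleted[j] = True
-- 		k += 1
-- 	return out
-- ===== Notes on version B (the rewrite author's own statement) =====
-- stated objective: alternative
-- what changed: Instead of rescanning and rebuilding the shrinking string each step, B indexes the positions of every character once into per-char queues and keeps a deletion flag array, recovering the current index of an original position j as j minus the number of deleted positions below j.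
import Mathlib
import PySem

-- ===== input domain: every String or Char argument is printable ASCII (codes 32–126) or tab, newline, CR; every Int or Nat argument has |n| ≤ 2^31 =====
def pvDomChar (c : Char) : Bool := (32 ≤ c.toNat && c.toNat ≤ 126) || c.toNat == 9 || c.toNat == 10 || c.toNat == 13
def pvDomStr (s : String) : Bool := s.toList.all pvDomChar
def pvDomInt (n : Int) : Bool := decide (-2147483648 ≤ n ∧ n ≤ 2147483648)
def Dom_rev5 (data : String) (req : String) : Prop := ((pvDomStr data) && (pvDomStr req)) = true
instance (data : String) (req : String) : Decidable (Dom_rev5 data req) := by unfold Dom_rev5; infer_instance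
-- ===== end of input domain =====

-- B replaces A's repeated scan-and-rebuild of the shrinking string by per-char position
-- queues built once plus a deletion flag array (alternative data structure, not faster).

-- ===== PORT A =====
-- one iteration of A's loop: i = data.index(x) (ValueError -> none); out.append((i-at)%len(data)); at=i; data=data[:at]+data[at+1:]
def rev5StepA (st : Option (List Char × Int × List Int)) (x : Char) :
    Option (List Char × Int × List Int) :=
  match st with
  | none => none
  | some (d, at_, out) =>
    let i := PySem.Chars.find d [x]
    if i = -1 then none
    else some (PySem.List.slice d none (some i) ++ PySem.List.slice d (some (i + 1)) none, i,
               out ++ [PySem.Int.mod (i - at_) (PySem.List.len d)])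

def rev5 (data : String) (req : String) : List Int :=
  match req.toList.foldl rev5StepA (some (data.toList, (0 : Int), ([] : List Int))) with
  | none => []
  | some s => s.2.2

-- ===== PORT B =====
-- one iteration of B's loop: q = queues[x] (KeyError -> none); j = q[0] (IndexError -> none);
-- queues[x] = q[1:]; i = j - sum(deleted[:j]) (sum of booleans = count of True); out.append((i-at)%(n-k)); at=i; deleted[j]=True; k+=1
def rev5StepB (n : Int)
    (st : Option (PySem.Dict Char (List Int) × List Bool × Int × Int × List Int)) (x : Char) :
    Option (PySem.Dict Char (List Int) × List Bool × Int × Int × List Int) :=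
  match st with
  | none => none
  | some (qs, deleted, at_, k, out) =>
    match qs.get? x with
    | none => none
    | some q =>
      match q with
      | [] => none
      | j :: _ =>
        let qs' := qs.insert x (PySem.List.slice q (some 1) none)
        let i := j - (((PySem.List.slice deleted none (some j)).countP (fun b => b) : Nat) : Int)
        some (qs', PySem.List.pySetD deleted j true, i, k + 1,
              out ++ [PySem.Int.mod (i - at_) (n - k)])

-- n = len(data); queues = positions of each char, built once by the enumerate loop
def rev5_alt (data : String) (req : String) : List Int :=
  match req.toList.foldl (rev5StepB (PySem.List.len data.toList))
      (some ((PySem.List.enumerate data.toList).foldl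
               (fun qs p => qs.modify p.2 [] (fun l => l ++ [p.1])) PySem.Dict.empty,
             List.replicate data.toList.length false, (0 : Int), (0 : Int),
             ([] : List Int))) with
  | none => []
  | some s => s.2.2.2.2

-- ===== PRECONDITION & SPEC =====
-- Pre_ excludes exactly the inputs where A raises: a ValueError from data.index(x) when some
-- character of req occurs in req more often than in data (this also covers empty data).
def Pre_rev5 (data : String) (req : String) : Prop :=
  (req.toList.all (fun c => req.toList.count c ≤ data.toList.count c)) = true
instance (data : String) (req : String) : Decidable (Pre_rev5 data req) := by
  unfold Pre_rev5; infer_instance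

def pvWitness_rev5 : String × String := ("abca", "aab")

def Spec_rev5 (data : String) (req : String) (out : List Int) : Prop := out = rev5_alt data req
instance (data : String) (req : String) (out : List Int) : Decidable (Spec_rev5 data req out) := by
  unfold Spec_rev5; infer_instance

-- ===== CLAIM (what is proved, stated in full; the proofs are below) =====
def Claim_equal_rev5 : Prop :=
  ∀ (data : String) (req : String), Dom_rev5 data req → Pre_rev5 data req →
    Spec_rev5 data req (rev5 data req)

-- ===== LEMMAS AND PROOFS =====

theorem pv_singleton_prefix {x : Char} {l : List Char} : [x] <+: l ↔ l.head? = some x := by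
  cases l with
  | nil => simp
  | cons a t =>
      constructor
      · rintro ⟨u, hu⟩; simp at hu; simp [hu.1]
      · intro h; simp at h; exact ⟨t, by simp [h]⟩

theorem pv_find_single {d : List Char} {x : Char} (hx : x ∈ d) :
    ∃ t : Nat, PySem.Chars.find d [x] = (t : Int) ∧ t < d.length ∧ d[t]? = some x ∧
      ∀ u, u < t → d[u]? ≠ some x := by
  have hinf : [x] <:+: d := by
    obtain ⟨s, t, rfl⟩ := List.append_of_mem hx
    exact ⟨s, t, by simp⟩
  have h0 : 0 ≤ PySem.Chars.find d [x] := (PySem.Chars.find_nonneg_iff d [x]).mpr hinf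
  obtain ⟨hp, hfirst⟩ := PySem.Chars.find_spec h0
  have hhead : (d.drop (PySem.Chars.find d [x]).toNat).head? = some x := pv_singleton_prefix.mp hp
  have ht : (PySem.Chars.find d [x]).toNat < d.length := by
    by_contra h
    rw [List.drop_eq_nil_of_le (by omega)] at hhead
    simp at hhead
  refine ⟨(PySem.Chars.find d [x]).toNat, (Int.toNat_of_nonneg h0).symm, ht, ?_, ?_⟩
  · rw [← List.head?_drop]; exact hhead
  · intro u hu hc
    exact hfirst u hu (pv_singleton_prefix.mpr (by rw [List.head?_drop]; exact hc))

theorem pv_filter_eq_cons_of_first {α : Type} (l : List α) (p : α → Bool) (t : Nat)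
    (ht : t < l.length) (hp : p (l[t]'ht) = true)
    (hbefore : ∀ u (h : u < t), p (l[u]'(by omega)) = false) :
    l.filter p = (l[t]'ht) :: (l.drop (t + 1)).filter p ∧ (l.take t).filter p = [] := by
  have htake : (l.take t).filter p = [] := by
    rw [List.filter_eq_nil_iff]
    intro a ha
    obtain ⟨j, hj, rfl⟩ := List.mem_take_iff_getElem.mp ha
    simp [hbefore j (by omega)]
  refine ⟨?_, htake⟩
  conv_lhs => rw [← List.take_append_drop t l, List.drop_eq_getElem_cons ht]
  rw [List.filter_append, htake, List.filter_cons_of_pos hp]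
  simp

theorem pv_sorted_count_lt {l : List Nat} (hs : l.Pairwise (· < ·)) (t : Nat)
    (ht : t < l.length) :
    (l.filter (fun j => decide (j < l[t]'ht))).length = t := by
  have hpg := List.pairwise_iff_getElem.mp hs
  have hdec : l = l.take t ++ (l[t]'ht) :: l.drop (t + 1) := by
    conv_lhs => rw [← List.take_append_drop t l, List.drop_eq_getElem_cons ht]
  have h1 : (l.take t).filter (fun j => decide (j < l[t]'ht)) = l.take t := by
    rw [List.filter_eq_self]
    intro a ha
    obtain ⟨j, hj, rfl⟩ := List.mem_take_iff_getElem.mp ha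
    simp only [decide_eq_true_eq]
    exact hpg j t (by omega) ht (by omega)
  have h2 : (l.drop (t + 1)).filter (fun j => decide (j < l[t]'ht)) = [] := by
    rw [List.filter_eq_nil_iff]
    intro a ha
    obtain ⟨j, hj, hja⟩ := List.mem_drop_iff_getElem.mp ha
    have := hpg t ((t + 1) + j) ht (by omega) (by omega)
    rw [hja] at this
    simp only [decide_eq_true_eq]
    omega
  conv_lhs => rw [show l.filter (fun j => decide (j < l[t]'ht)) =
    (l.take t ++ (l[t]'ht) :: l.drop (t + 1)).filter (fun j => decide (j < l[t]'ht)) from by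
      rw [← hdec]]
  rw [List.filter_append, h1, List.filter_cons_of_neg (by simp), h2]
  simp
  try omega

theorem pv_countP_lt_succ (l : List Nat) (m : Nat) :
    l.countP (fun j => decide (j < m + 1)) = l.countP (fun j => decide (j < m)) + l.count m := by
  induction l with
  | nil => simp
  | cons a tl ih =>
      simp only [List.countP_cons, List.count_cons, ih]
      by_cases h1 : a < m
      · simp [h1, show a < m + 1 from by omega, show ¬ (a == m) = true from by simp; omega]
        try omega
      · by_cases h2 : a = m
        · subst h2
          simp [h1]
          try omega
        · simp [h1, h2, show ¬ a < m + 1 from by omega]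
          try omega

theorem pv_countP_mem_range (rem : List Nat) (hnd : rem.Nodup) (m : Nat) :
    (List.range m).countP (fun j => decide (j ∈ rem)) =
      (rem.filter (fun j => decide (j < m))).length := by
  induction m with
  | zero => simp
  | succ m ih =>
      rw [List.range_succ, List.countP_append, ih, ← List.countP_eq_length_filter,
        ← List.countP_eq_length_filter, pv_countP_lt_succ]
      have hcnt : rem.count m = if m ∈ rem then 1 else 0 := by
        split_ifs with h
        · exact List.count_eq_one_of_mem hnd h
        · exact List.count_eq_zero.mpr h
      simp [hcnt]

theorem pv_map_getD_range (L : List Char) :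
    (List.range L.length).map (fun j => L.getD j 'a') = L := by
  apply List.ext_getElem (by simp)
  intro i h1 h2
  simp [List.getElem?_eq_getElem h2]

theorem pv_pairs_fold (l : List (Int × Char)) (d : PySem.Dict Char (List Int)) (c : Char) :
    (l.foldl (fun d p => d.modify p.2 [] (fun x => x ++ [p.1])) d).getD c [] =
      d.getD c [] ++ (l.filter (fun p => p.2 == c)).map (fun p => p.1) := by
  rw [show l.foldl (fun d p => d.modify p.2 [] (fun x => x ++ [p.1])) d
      = (l.map (fun p => (p.2, p.1))).foldl (fun d p => d.modify p.1 [] (fun x => x ++ [p.2])) d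
      from by simp only [List.foldl_map]]
  rw [PySem.Dict.getD_foldl_modify_append, List.filter_map, List.map_map]
  simp [Function.comp_def]

theorem pv_queues_build (L : List Char) (c : Char) :
    ((PySem.List.enumerate L).foldl
        (fun qs p => qs.modify p.2 [] (fun l => l ++ [p.1])) PySem.Dict.empty).getD c [] =
      ((List.range L.length).filter (fun j => L.getD j 'a' == c)).map (fun j : Nat => (j : Int)) := by
  rw [pv_pairs_fold, PySem.Dict.getD_empty]
  rw [PySem.List.enumerate_eq_map_pyRange L 'a']
  rw [show PySem.List.pyRange 0 (PySem.List.len L) =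
      (List.range L.length).map (fun k : Nat => (k : Int)) from by
    rw [PySem.List.len_eq]; exact PySem.List.pyRange_zero_nat L.length]
  rw [List.map_map, List.filter_map, List.map_map]
  simp [Function.comp_def, ← List.map_eq_flatMap]

theorem pv_loop (L : List Char) (xs : List Char) (rem : List Nat)
    (qs : PySem.Dict Char (List Int)) (at_ : Int) (k : Int) (out : List Int)
    (hlt : ∀ j ∈ rem, j < L.length)
    (hsort : rem.Pairwise (· < ·))
    (hq : ∀ c, qs.getD c [] =
      (rem.filter (fun j => L.getD j 'a' == c)).map (fun j : Nat => (j : Int)))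
    (hk : k = (L.length : Int) - (rem.length : Int))
    (hpre : ∀ c ∈ xs, xs.count c ≤ (rem.map (fun j => L.getD j 'a')).count c) :
    ∃ sA sB,
      List.foldl rev5StepA (some (rem.map (fun j => L.getD j 'a'), at_, out)) xs = some sA ∧
      List.foldl (rev5StepB (L.length : Int))
        (some (qs, (List.range L.length).map (fun j => decide (¬ j ∈ rem)), at_, k, out)) xs
        = some sB ∧
      sA.2.2 = sB.2.2.2.2 := by
  induction xs generalizing rem qs at_ k out with
  | nil => exact ⟨_, _, rfl, rfl, rfl⟩
  | cons x rest ih =>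
    have hxd : x ∈ rem.map (fun j => L.getD j 'a') := by
      have h1 := hpre x List.mem_cons_self
      have h2 : 0 < (x :: rest).count x := by simp [List.count_cons]
      exact List.count_pos_iff.mp (lt_of_lt_of_le h2 h1)
    obtain ⟨t, hF, htd, hdt, hbefore⟩ := pv_find_single hxd
    have htr : t < rem.length := by simpa using htd
    have hnd : rem.Nodup := hsort.imp (fun h => Nat.ne_of_lt h)
    have hcht : L.getD (rem[t]'htr) 'a' = x := by
      have h := hdt
      rw [List.getElem?_map, List.getElem?_eq_getElem htr] at h
      simp only [Option.map_some, Option.some.injEq] at h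
      exact h
    have hcht' : L[rem[t]'htr]?.getD 'a' = x := by
      rw [← List.getD_eq_getElem?_getD]
      exact hcht
    have hpxbefore : ∀ u (hu : u < t), (fun j => L.getD j 'a' == x) (rem[u]'(by omega)) = false := by
      intro u hu
      have h := hbefore u hu
      rw [List.getElem?_map, List.getElem?_eq_getElem (show u < rem.length from by omega)] at h
      simp only [Option.map_some] at h
      simp only [beq_eq_false_iff_ne]
      exact fun he => h (by rw [he])
    obtain ⟨hfcons, hftake⟩ :=
      pv_filter_eq_cons_of_first rem (fun j => L.getD j 'a' == x) t htr (by simp [hcht']) hpxbefore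
    have hj0mem : rem[t]'htr ∈ rem := List.getElem_mem htr
    have hj0L : rem[t]'htr < L.length := hlt _ hj0mem
    have herase : rem.eraseIdx t = rem.take t ++ rem.drop (t + 1) :=
      List.eraseIdx_eq_take_drop_succ rem t
    have hremdec : rem = rem.take t ++ (rem[t]'htr) :: rem.drop (t + 1) := by
      conv_lhs => rw [← List.take_append_drop t rem, List.drop_eq_getElem_cons htr]
    have hnd2 : (rem.take t ++ (rem[t]'htr) :: rem.drop (t + 1)).Nodup := hremdec ▸ hnd
    have hj0take : (rem[t]'htr) ∉ rem.take t := by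
      rcases List.nodup_append.mp hnd2 with ⟨-, -, hdisj⟩
      intro hmem
      exact hdisj _ hmem _ List.mem_cons_self rfl
    have hj0drop : (rem[t]'htr) ∉ rem.drop (t + 1) := by
      rcases List.nodup_append.mp hnd2 with ⟨-, hcons, -⟩
      exact (List.nodup_cons.mp hcons).1
    have hj0notin : (rem[t]'htr) ∉ rem.eraseIdx t := by
      rw [herase]
      simp [hj0take, hj0drop]
    have hmemiff : ∀ u, u ≠ rem[t]'htr → (u ∈ rem.eraseIdx t ↔ u ∈ rem) := by
      intro u hu
      constructor
      · intro h
        exact List.eraseIdx_subset h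
      · intro h
        have h2 : u ∈ rem.take t ++ (rem[t]'htr) :: rem.drop (t + 1) := hremdec ▸ h
        rw [herase]
        rcases List.mem_append.mp h2 with h1 | h1
        · exact List.mem_append.mpr (Or.inl h1)
        · rcases List.mem_cons.mp h1 with h3 | h3
          · exact absurd h3 hu
          · exact List.mem_append.mpr (Or.inr h3)
    have hcount : (List.range (rem[t]'htr)).countP (fun j => decide (j ∈ rem)) = t := by
      rw [pv_countP_mem_range rem hnd]
      exact pv_sorted_count_lt hsort t htr
    -- value of A's one step
    have hstepA : rev5StepA (some (rem.map (fun j => L.getD j 'a'), at_, out)) x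
        = some ((rem.eraseIdx t).map (fun j => L.getD j 'a'), (t : Int),
                out ++ [PySem.Int.mod ((t : Int) - at_) ((rem.length : Int))]) := by
      simp only [rev5StepA, hF]
      rw [if_neg (by omega)]
      rw [PySem.List.slice_to_natCast]
      rw [show ((t : Int) + 1) = ((t + 1 : Nat) : Int) from by push_cast; ring]
      rw [PySem.List.slice_from_natCast]
      rw [← List.eraseIdx_eq_take_drop_succ, List.eraseIdx_map]
      simp [PySem.List.len_eq]
    -- value of queues[x]
    have hget : qs.get? x
        = some ((rem.filter (fun j => L.getD j 'a' == x)).map (fun j : Nat => (j : Int))) := by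
      have h := hq x
      cases hg : qs.get? x with
      | none =>
          rw [PySem.Dict.getD_eq_get?_getD, hg] at h
          rw [hfcons] at h
          simp at h
      | some q =>
          rw [PySem.Dict.getD_eq_get?_getD, hg] at h
          simp only [Option.getD_some] at h
          rw [h]
    have hqcons : (rem.filter (fun j => L.getD j 'a' == x)).map (fun j : Nat => (j : Int))
        = ((rem[t]'htr : Nat) : Int) ::
          ((rem.drop (t + 1)).filter (fun j => L.getD j 'a' == x)).map (fun j : Nat => (j : Int)) := by
      rw [hfcons]
      simp
    -- i value on B's side
    have hib : ((rem[t]'htr : Nat) : Int)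
        - ((((PySem.List.slice ((List.range L.length).map (fun j => decide (¬ j ∈ rem))) none
            (some ((rem[t]'htr : Nat) : Int))).countP (fun b => b) : Nat)) : Int) = (t : Int) := by
      rw [PySem.List.slice_to_natCast, ← List.map_take, List.take_range,
        show min (rem[t]'htr) L.length = rem[t]'htr from by omega, List.countP_map]
      have hsplit := List.length_eq_countP_add_countP (fun j : Nat => decide (j ∈ rem))
        (l := List.range (rem[t]'htr))
      have hco : (List.range (rem[t]'htr)).countP
            (fun a => decide (¬ (decide (a ∈ rem)) = true))
          = (List.range (rem[t]'htr)).countP ((fun b => b) ∘ (fun j => decide (¬ j ∈ rem))) := by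
        apply List.countP_congr
        intro a _
        simp
      rw [List.length_range] at hsplit
      rw [← hco]
      have hle : (List.range (rem[t]'htr)).countP
          (fun a => decide (¬ (decide (a ∈ rem)) = true)) ≤ (rem[t]'htr) := by
        calc _ ≤ (List.range (rem[t]'htr)).length := List.countP_le_length
        _ = _ := List.length_range
      rw [hcount] at hsplit
      omega
    -- the new deleted array
    have hdel : ((List.range L.length).map (fun j => decide (¬ j ∈ rem))).set (rem[t]'htr) true
        = (List.range L.length).map (fun j => decide (¬ j ∈ rem.eraseIdx t)) := by
      apply List.ext_getElem (by simp)
      intro u h1 h2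
      rw [List.getElem_set]
      have hu : u < L.length := by simpa using h2
      simp only [List.getElem_map, List.getElem_range]
      by_cases huj : rem[t]'htr = u
      · subst huj
        simp [hj0notin]
      · rw [if_neg huj]
        have hiff := hmemiff u (fun he => huj he.symm)
        simp [hiff]
    -- filter unchanged for other characters
    have hfilterne : ∀ c, c ≠ x →
        rem.filter (fun j => L.getD j 'a' == c)
          = (rem.eraseIdx t).filter (fun j => L.getD j 'a' == c) := by
      intro c hc
      conv_lhs => rw [hremdec]
      rw [herase, List.filter_append,
        List.filter_cons_of_neg (by simp [hcht']; exact fun h => hc h.symm), List.filter_append]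
    -- tail of the queue
    have htail : ((rem.drop (t + 1)).filter (fun j => L.getD j 'a' == x)).map (fun j : Nat => (j : Int))
        = ((rem.eraseIdx t).filter (fun j => L.getD j 'a' == x)).map (fun j : Nat => (j : Int)) := by
      rw [herase, List.filter_append, hftake]
      simp
    -- value of B's one step
    have hstepB : rev5StepB (L.length : Int)
        (some (qs, (List.range L.length).map (fun j => decide (¬ j ∈ rem)), at_, k, out)) x
        = some (qs.insert x
            (((rem.eraseIdx t).filter (fun j => L.getD j 'a' == x)).map (fun j : Nat => (j : Int))),
          (List.range L.length).map (fun j => decide (¬ j ∈ rem.eraseIdx t)),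
          (t : Int), k + 1,
          out ++ [PySem.Int.mod ((t : Int) - at_) ((rem.length : Int))]) := by
      simp only [rev5StepB, hget, hqcons]
      rw [PySem.List.slice_from_one]
      simp only [List.tail_cons]
      rw [htail, PySem.List.pySetD_natCast, hdel, hib]
      rw [show (L.length : Int) - k = (rem.length : Int) from by omega]
    rw [List.foldl_cons, List.foldl_cons, hstepA, hstepB]
    apply ih (rem.eraseIdx t) _ (t : Int) (k + 1) _
    · intro j hj
      exact hlt j (List.eraseIdx_subset hj)
    · exact List.Pairwise.sublist (List.eraseIdx_sublist rem t) hsort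
    · intro c
      rw [PySem.Dict.getD_insert]
      by_cases hc : c = x
      · subst hc
        rw [if_pos rfl]
      · rw [if_neg hc, hq c, hfilterne c hc]
    · rw [List.length_eraseIdx]
      simp only [if_pos htr]
      have : 1 ≤ rem.length := by omega
      push_cast [Nat.cast_sub this]
      omega
    · intro c hc
      have h1 := hpre c (List.mem_cons_of_mem x hc)
      rw [List.count_cons] at h1
      set d := rem.map (fun j => L.getD j 'a') with hd
      have hdm : (rem.eraseIdx t).map (fun j => L.getD j 'a') = d.eraseIdx t := by
        rw [hd, List.eraseIdx_map]
      rw [hdm]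
      have htd' : t < d.length := htd
      have hdt' : d[t]'htd' = x := by
        have h := hdt
        rw [List.getElem?_eq_getElem htd'] at h
        simp only [Option.some.injEq] at h
        exact h
      have hddec : d = d.take t ++ x :: d.drop (t + 1) := by
        conv_lhs => rw [← List.take_append_drop t d, List.drop_eq_getElem_cons htd', hdt']
      have he2 : d.eraseIdx t = d.take t ++ d.drop (t + 1) := List.eraseIdx_eq_take_drop_succ _ _
      have hcb : d.count c = (d.take t).count c + (x :: d.drop (t + 1)).count c := by
        conv_lhs => rw [hddec]
        rw [List.count_append]
      have hce : (d.eraseIdx t).count c = (d.take t).count c + (d.drop (t + 1)).count c := by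
        rw [he2, List.count_append]
      rw [List.count_cons] at hcb
      by_cases hxc : (x == c) = true
      · rw [if_pos hxc] at h1 hcb
        omega
      · rw [if_neg hxc] at h1 hcb
        omega

-- ===== VERDICT (by name: the statement is the Claim_ definition above) =====
theorem rev5_spec : Claim_equal_rev5 := by
  intro data req _hdom hpre
  unfold Spec_rev5 rev5 rev5_alt
  have hrep : List.replicate data.toList.length false =
      (List.range data.toList.length).map
        (fun j => decide (¬ j ∈ List.range data.toList.length)) := by
    rw [List.map_congr_left (g := fun _ => false)
      (by intro j hj
          have hj' : j < data.length := by simpa using hj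
          simp [hj'])]
    simp [List.map_const']
  obtain ⟨sA, sB, hA, hB, hout⟩ := pv_loop data.toList req.toList
      (List.range data.toList.length) _ 0 0 []
      (by intro j hj; exact List.mem_range.mp hj)
      List.pairwise_lt_range
      (fun c => pv_queues_build data.toList c)
      (by simp)
      (by intro c hc
          rw [pv_map_getD_range]
          have h := List.all_eq_true.mp hpre c hc
          simpa using h)
  rw [pv_map_getD_range] at hA
  have hlen : PySem.List.len data.toList = ((data.toList.length : Nat) : Int) := by
    simp [PySem.List.len_eq]
  rw [hlen, hrep, hB, hA]
  exact hout
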